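-- pv_equiv track=rewrite | github.com/goodahn/stego | util.py | Zigzag_scan
-- ===== SOURCE A (Python) =====
-- def Zigzag_scan(n):
--     x = 0
--     y = 0
--     k = 0
--     direction = 1
--     result = []
--     while k <= n:
--         for i in range(k+1):
--             result.append([y,x])
--             if direction == 1 and i != k:
--                 x += 1
--                 y -= 1
--             elif direction == -1 and i != k:
--                 x -= 1
--                 y += 1
--         if direction == 1 and k != n:
--             direction = -1
--             x += 1
--         elif direction == -1 and k != n:
--             direction = 1
--             y += 1
--         k += 1
--     k -= 1
--     if direction == 1:
--         y += 1
--         direction = -1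
--     else:
--         x += 1
--         direction = 1
--     for j in range(k):
--         for i in range(k,0,-1):
--             result.append([y,x])
--             if direction == 1 and i != 1:
--                 x += 1
--                 y -= 1
--             elif direction == -1 and i != 1:
--                 x -= 1
--                 y += 1
--         if direction == 1:
--             direction = -1
--             y += 1
--         else:
--             direction = 1
--             x += 1
--         k -= 1
--     return result
-- ===== SOURCE B (Python) =====
-- def Zigzag_scan(n):
--     result = []
--     for d in range(2 * n + 1):
--         lo = max(0, d - n)
--         hi = min(d, n)
--         if d % 2 == 1:
--             ys = range(lo, hi + 1)
--         else:
--             ys = range(hi, lo - 1, -1)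
--         for y in ys:
--             result.append([y, d - y])
--     return result
-- ===== Notes on version B (the rewrite author's own statement) =====
-- stated objective: simpler
-- what changed: Replaces the stateful direction-flag walk (two while/for phases mutating x,y,k,direction) with a direct per-anti-diagonal enumeration: for each d in range(2n+1) emit [y,d-y] over the clipped y-range, ascending for odd d and descending for even d.
import Mathlib
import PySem

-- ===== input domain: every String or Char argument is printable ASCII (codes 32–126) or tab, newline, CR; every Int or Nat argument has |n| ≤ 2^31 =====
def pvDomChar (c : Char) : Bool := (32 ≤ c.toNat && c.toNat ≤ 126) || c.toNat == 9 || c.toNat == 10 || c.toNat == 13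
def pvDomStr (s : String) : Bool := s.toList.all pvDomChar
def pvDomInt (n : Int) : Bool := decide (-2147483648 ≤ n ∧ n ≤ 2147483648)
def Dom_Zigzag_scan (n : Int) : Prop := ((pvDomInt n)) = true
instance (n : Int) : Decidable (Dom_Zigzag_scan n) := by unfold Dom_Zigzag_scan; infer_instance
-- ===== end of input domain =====

-- B replaces A's stateful direction-flag walk with a direct per-anti-diagonal enumeration (objective: simpler).


-- ===== PORT A =====
-- one loop-body step: append [y,x], then move unless i equals the sentinel t
-- (t = k in the first phase's 'i != k', t = 1 in the second phase's 'i != 1')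
def stepA (dir t : Int) (st : Int × Int × List (List Int)) (i : Int) :
    Int × Int × List (List Int) :=
  let x := st.1; let y := st.2.1
  let res := st.2.2 ++ [[y, x]]
  if dir = 1 ∧ i ≠ t then (x + 1, y - 1, res)
  else if dir = -1 ∧ i ≠ t then (x - 1, y + 1, res)
  else (x, y, res)

-- 'for i in range(k+1): …' of the first phase
def innerA (dir k : Int) (st : Int × Int × List (List Int)) : Int × Int × List (List Int) :=
  (PySem.List.pyRange 0 (k + 1) 1).foldl (stepA dir k) st

-- 'for i in range(k,0,-1): …' of the second phase
def innerC (dir k : Int) (st : Int × Int × List (List Int)) : Int × Int × List (List Int) :=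
  (PySem.List.pyRange k 0 (-1)).foldl (stepA dir 1) st

-- 'while k <= n: …'
def whileA (n x y k dir : Int) (res : List (List Int)) :
    Int × Int × Int × Int × List (List Int) :=
  if k ≤ n then
    let st := innerA dir k (x, y, res)
    let x1 := st.1; let y1 := st.2.1; let res1 := st.2.2
    let x2 := if dir = 1 ∧ k ≠ n then x1 + 1 else x1
    let y2 := if dir = -1 ∧ k ≠ n then y1 + 1 else y1
    let dir2 := if dir = 1 ∧ k ≠ n then -1 else if dir = -1 ∧ k ≠ n then 1 else dir
    whileA n x2 y2 (k + 1) dir2 res1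
  else (x, y, k, dir, res)
termination_by (n + 1 - k).toNat
decreasing_by omega

-- one iteration of 'for j in range(k)' in the second phase (state x, y, k, dir, res; j unused)
def step2 (st : Int × Int × Int × Int × List (List Int)) (_j : Int) :
    Int × Int × Int × Int × List (List Int) :=
  let x := st.1; let y := st.2.1; let k := st.2.2.1; let dir := st.2.2.2.1; let res := st.2.2.2.2
  let t := innerC dir k (x, y, res)
  let x1 := t.1; let y1 := t.2.1; let res1 := t.2.2
  if dir = 1 then (x1, y1 + 1, k - 1, -1, res1) else (x1 + 1, y1, k - 1, 1, res1)

def Zigzag_scan (n : Int) : List (List Int) :=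
  let w := whileA n 0 0 0 1 []
  let x := w.1; let y := w.2.1; let k := w.2.2.1 - 1; let dir := w.2.2.2.1; let res := w.2.2.2.2
  let x' := if dir = 1 then x else x + 1
  let y' := if dir = 1 then y + 1 else y
  let dir' := if dir = 1 then (-1 : Int) else 1
  ((PySem.List.pyRange 0 k 1).foldl step2 (x', y', k, dir', res)).2.2.2.2

-- ===== PORT B =====
def Zigzag_scan_alt (n : Int) : List (List Int) :=
  (PySem.List.pyRange 0 (2 * n + 1) 1).foldl (fun res d =>
    let lo := max 0 (d - n)
    let hi := min d n
    let ys := if PySem.Int.mod d 2 = 1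
      then PySem.List.pyRange lo (hi + 1) 1
      else PySem.List.pyRange hi (lo - 1) (-1)
    ys.foldl (fun res y => res ++ [[y, d - y]]) res) []

-- ===== PRECONDITION & SPEC =====
def Spec_Zigzag_scan (n : Int) (out : List (List Int)) : Prop := out = Zigzag_scan_alt n
instance (n : Int) (out : List (List Int)) : Decidable (Spec_Zigzag_scan n out) := by unfold Spec_Zigzag_scan; infer_instance

-- ===== CLAIM (what is proved, stated in full; the proofs are below) =====
def Claim_equal_Zigzag_scan : Prop := ∀ (n : Int), Dom_Zigzag_scan n → Spec_Zigzag_scan n (Zigzag_scan n)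

-- ===== LEMMAS AND PROOFS =====

-- the entries B emits for anti-diagonal d (exactly B's per-d list)
def diag (n d : Int) : List (List Int) :=
  if PySem.Int.mod d 2 = 1
  then (PySem.List.pyRange (max 0 (d - n)) (min d n + 1) 1).map (fun y => [y, d - y])
  else (PySem.List.pyRange (min d n) (max 0 (d - n) - 1) (-1)).map (fun y => [y, d - y])

theorem alt_eq_flatMap (n : Int) :
    Zigzag_scan_alt n = (PySem.List.pyRange 0 (2 * n + 1) 1).flatMap (diag n) := by
  unfold Zigzag_scan_alt
  have hstep : (fun (res : List (List Int)) (d : Int) =>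
      let lo := max 0 (d - n)
      let hi := min d n
      let ys := if PySem.Int.mod d 2 = 1
        then PySem.List.pyRange lo (hi + 1) 1
        else PySem.List.pyRange hi (lo - 1) (-1)
      ys.foldl (fun res y => res ++ [[y, d - y]]) res) =
      (fun res d => res ++ diag n d) := by
    funext res d
    simp only [diag]
    split_ifs <;> rw [PySem.List.foldl_append_singleton_eq_map]
  rw [hstep, PySem.List.foldl_append_eq_flatMap]
  simp

-- peeling the first entry off a diagonal segment
theorem shift_up (y x : Int) (m : Nat) :
    (res : List (List Int)) →
    (res ++ [[y, x]]) ++ (List.range (m + 1)).map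
        (fun (j : Nat) => [y - 1 - (j : Int), x + 1 + (j : Int)]) =
      res ++ (List.range (m + 1 + 1)).map (fun (j : Nat) => [y - (j : Int), x + (j : Int)]) := by
  intro res
  rw [List.append_assoc, List.singleton_append,
    List.range_succ_eq_map (n := m + 1), List.map_cons, List.map_map]
  congr 2
  · norm_num
  refine List.map_congr_left ?_
  intro j _
  simp only [Function.comp_apply, Nat.succ_eq_add_one, List.cons.injEq, and_true]
  constructor <;> push_cast <;> ring

theorem shift_down (y x : Int) (m : Nat) :
    (res : List (List Int)) →
    (res ++ [[y, x]]) ++ (List.range (m + 1)).map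
        (fun (j : Nat) => [y + 1 + (j : Int), x - 1 - (j : Int)]) =
      res ++ (List.range (m + 1 + 1)).map (fun (j : Nat) => [y + (j : Int), x - (j : Int)]) := by
  intro res
  rw [List.append_assoc, List.singleton_append,
    List.range_succ_eq_map (n := m + 1), List.map_cons, List.map_map]
  congr 2
  · norm_num
  refine List.map_congr_left ?_
  intro j _
  simp only [Function.comp_apply, Nat.succ_eq_add_one, List.cons.injEq, and_true]
  constructor <;> push_cast <;> ring

-- first-phase inner loop, direction 1 (moves x+1, y-1 except at i = k)
theorem foldA_up (m : Nat) : ∀ (a k x y : Int) (res : List (List Int)), a + m = k →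
    (PySem.List.pyRange a (k + 1) 1).foldl (stepA 1 k) (x, y, res) =
      (x + m, y - m, res ++ (List.range (m + 1)).map (fun (j : Nat) => [y - (j : Int), x + (j : Int)])) := by
  induction m with
  | zero =>
    intro a k x y res h
    subst h
    rw [show a + (0:Nat) + 1 = a + 1 by omega, PySem.List.pyRange_one_singleton]
    simp [stepA]
  | succ m ih =>
    intro a k x y res h
    rw [PySem.List.pyRange_one_cons (by omega)]
    have hstep : stepA 1 k (x, y, res) a = (x + 1, y - 1, res ++ [[y, x]]) := by
      simp [stepA]; omega
    rw [List.foldl_cons, hstep, ih (a + 1) k (x + 1) (y - 1) (res ++ [[y, x]]) (by omega)]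
    refine Prod.ext (by push_cast; ring) (Prod.ext (by push_cast; ring) ?_)
    exact shift_up y x m res

-- first-phase inner loop, direction -1 (moves x-1, y+1 except at i = k)
theorem foldA_down (m : Nat) : ∀ (a k x y : Int) (res : List (List Int)), a + m = k →
    (PySem.List.pyRange a (k + 1) 1).foldl (stepA (-1) k) (x, y, res) =
      (x - m, y + m, res ++ (List.range (m + 1)).map (fun (j : Nat) => [y + (j : Int), x - (j : Int)])) := by
  induction m with
  | zero =>
    intro a k x y res h
    subst h
    rw [show a + (0:Nat) + 1 = a + 1 by omega, PySem.List.pyRange_one_singleton]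
    simp [stepA]
  | succ m ih =>
    intro a k x y res h
    rw [PySem.List.pyRange_one_cons (by omega)]
    have hstep : stepA (-1) k (x, y, res) a = (x - 1, y + 1, res ++ [[y, x]]) := by
      simp [stepA]; omega
    rw [List.foldl_cons, hstep, ih (a + 1) k (x - 1) (y + 1) (res ++ [[y, x]]) (by omega)]
    refine Prod.ext (by push_cast; ring) (Prod.ext (by push_cast; ring) ?_)
    exact shift_down y x m res

-- second-phase inner loop, direction 1
theorem foldC_up (m : Nat) : ∀ (x y : Int) (res : List (List Int)),
    (PySem.List.pyRange ((m : Int) + 1) 0 (-1)).foldl (stepA 1 1) (x, y, res) =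
      (x + m, y - m, res ++ (List.range (m + 1)).map (fun (j : Nat) => [y - (j : Int), x + (j : Int)])) := by
  induction m with
  | zero =>
    intro x y res
    rw [PySem.List.pyRange_neg_one_cons (by omega),
        PySem.List.pyRange_neg_one_eq_nil (by omega)]
    simp [stepA]
  | succ m ih =>
    intro x y res
    rw [PySem.List.pyRange_neg_one_cons (by omega)]
    have hstep : stepA 1 1 (x, y, res) ((m : Int) + 1 + 1) = (x + 1, y - 1, res ++ [[y, x]]) := by
      simp [stepA]; omega
    have hrange : ((m : Int) + 1 + 1 - 1) = (m : Int) + 1 := by ring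
    rw [List.foldl_cons]
    push_cast
    rw [hstep, hrange, ih (x + 1) (y - 1) (res ++ [[y, x]])]
    refine Prod.ext (by push_cast; ring) (Prod.ext (by push_cast; ring) ?_)
    exact shift_up y x m res

-- second-phase inner loop, direction -1
theorem foldC_down (m : Nat) : ∀ (x y : Int) (res : List (List Int)),
    (PySem.List.pyRange ((m : Int) + 1) 0 (-1)).foldl (stepA (-1) 1) (x, y, res) =
      (x - m, y + m, res ++ (List.range (m + 1)).map (fun (j : Nat) => [y + (j : Int), x - (j : Int)])) := by
  induction m with
  | zero =>
    intro x y res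
    rw [PySem.List.pyRange_neg_one_cons (by omega),
        PySem.List.pyRange_neg_one_eq_nil (by omega)]
    simp [stepA]
  | succ m ih =>
    intro x y res
    rw [PySem.List.pyRange_neg_one_cons (by omega)]
    have hstep : stepA (-1) 1 (x, y, res) ((m : Int) + 1 + 1) = (x - 1, y + 1, res ++ [[y, x]]) := by
      simp [stepA]; omega
    have hrange : ((m : Int) + 1 + 1 - 1) = (m : Int) + 1 := by ring
    rw [List.foldl_cons]
    push_cast
    rw [hstep, hrange, ih (x - 1) (y + 1) (res ++ [[y, x]])]
    refine Prod.ext (by push_cast; ring) (Prod.ext (by push_cast; ring) ?_)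
    exact shift_down y x m res

-- closed forms of diag
theorem diag_even_le (n k : Int) (h0 : 0 ≤ k) (h1 : k ≤ n) (he : k % 2 = 0) :
    diag n k = (List.range (k.toNat + 1)).map (fun (j : Nat) => [k - (j : Int), 0 + (j : Int)]) := by
  unfold diag
  rw [if_neg (by rw [PySem.Int.mod_eq_emod_of_pos (show (0:Int) < 2 by omega)]; omega)]
  rw [show max 0 (k - n) - 1 = -1 by omega, show min k n = k by omega,
      PySem.List.pyRange_neg_one, show (k - -1).toNat = k.toNat + 1 by omega, List.map_map]
  refine List.map_congr_left ?_
  intro j _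
  simp only [Function.comp_apply, List.cons.injEq, and_true, true_and]
  omega

theorem diag_odd_le (n k : Int) (h0 : 0 ≤ k) (h1 : k ≤ n) (he : k % 2 = 1) :
    diag n k = (List.range (k.toNat + 1)).map (fun (j : Nat) => [0 + (j : Int), k - (j : Int)]) := by
  unfold diag
  rw [if_pos (by rw [PySem.Int.mod_eq_emod_of_pos (show (0:Int) < 2 by omega)]; omega)]
  rw [show max 0 (k - n) = 0 by omega, show min k n = k by omega,
      PySem.List.pyRange_one, show (k + 1 - 0).toNat = k.toNat + 1 by omega, List.map_map]
  refine List.map_congr_left ?_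
  intro j _
  simp only [Function.comp_apply, List.cons.injEq, and_true, true_and]
  omega

theorem diag_even_gt (n d : Int) (h0 : n < d) (h1 : d ≤ 2 * n) (he : d % 2 = 0) :
    diag n d = (List.range ((2 * n + 1 - d).toNat)).map (fun (j : Nat) => [n - (j : Int), (d - n) + (j : Int)]) := by
  unfold diag
  rw [if_neg (by rw [PySem.Int.mod_eq_emod_of_pos (show (0:Int) < 2 by omega)]; omega)]
  rw [show max 0 (d - n) - 1 = d - n - 1 by omega, show min d n = n by omega,
      PySem.List.pyRange_neg_one, show (n - (d - n - 1)).toNat = (2 * n + 1 - d).toNat by omega,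
      List.map_map]
  refine List.map_congr_left ?_
  intro j _
  simp only [Function.comp_apply, List.cons.injEq, and_true, true_and]
  omega

theorem diag_odd_gt (n d : Int) (h0 : n < d) (h1 : d ≤ 2 * n) (he : d % 2 = 1) :
    diag n d = (List.range ((2 * n + 1 - d).toNat)).map (fun (j : Nat) => [(d - n) + (j : Int), n - (j : Int)]) := by
  unfold diag
  rw [if_pos (by rw [PySem.Int.mod_eq_emod_of_pos (show (0:Int) < 2 by omega)]; omega)]
  rw [show max 0 (d - n) = d - n by omega, show min d n + 1 = n + 1 by omega,
      PySem.List.pyRange_one, show (n + 1 - (d - n)).toNat = (2 * n + 1 - d).toNat by omega,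
      List.map_map]
  refine List.map_congr_left ?_
  intro j _
  simp only [Function.comp_apply, List.cons.injEq, and_true, true_and]
  omega

-- the while loop returns immediately once k exceeds n
theorem whileA_stop (n x y k dir : Int) (res : List (List Int)) (h : n < k) :
    whileA n x y k dir res = (x, y, k, dir, res) := by
  unfold whileA
  rw [if_neg (by omega)]

-- first phase: the while loop emits diagonals k..n and ends at the far corner of diagonal n
theorem whileA_inv (m : Nat) : ∀ (n k x y dir : Int) (res : List (List Int)),
    k + m = n → 0 ≤ k →
    (dir = 1 ∧ k % 2 = 0 ∧ y = k ∧ x = 0 ∨ dir = -1 ∧ k % 2 = 1 ∧ y = 0 ∧ x = k) →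
    whileA n x y k dir res =
      ((if n % 2 = 0 then n else 0), (if n % 2 = 0 then (0 : Int) else n), n + 1,
       (if n % 2 = 0 then (1 : Int) else -1),
       res ++ (PySem.List.pyRange k (n + 1) 1).flatMap (diag n)) := by
  induction m with
  | zero =>
    intro n k x y dir res hm h0 hinv
    have hk : k = n := by omega
    subst hk
    unfold whileA
    rw [if_pos le_rfl]
    rcases hinv with ⟨hd, hp, hy, hx⟩ | ⟨hd, hp, hy, hx⟩
    · rw [hd, hy, hx]
      have h1 : innerA 1 k (0, k, res) = (k, 0, res ++ diag k k) := by
        unfold innerA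
        rw [foldA_up k.toNat 0 k 0 k res (by omega),
          diag_even_le k k h0 le_rfl hp]
        simp only [Prod.mk.injEq, and_true]
        exact ⟨by omega, by omega⟩
      simp only [h1]
      rw [whileA_stop _ _ _ _ _ _ (by omega),
        PySem.List.pyRange_one_singleton, List.flatMap_cons, List.flatMap_nil,
        List.append_nil]
      simp [hp]
    · rw [hd, hy, hx]
      have h1 : innerA (-1) k (k, 0, res) = (0, k, res ++ diag k k) := by
        unfold innerA
        rw [foldA_down k.toNat 0 k k 0 res (by omega),
          diag_odd_le k k h0 le_rfl hp]
        simp only [Prod.mk.injEq, and_true]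
        exact ⟨by omega, by omega⟩
      simp only [h1]
      rw [whileA_stop _ _ _ _ _ _ (by omega),
        PySem.List.pyRange_one_singleton, List.flatMap_cons, List.flatMap_nil,
        List.append_nil]
      simp [hp]
  | succ m ih =>
    intro n k x y dir res hm h0 hinv
    have hkn : k < n := by omega
    unfold whileA
    rw [if_pos (by omega)]
    rcases hinv with ⟨hd, hp, hy, hx⟩ | ⟨hd, hp, hy, hx⟩
    · rw [hd, hy, hx]
      have h1 : innerA 1 k (0, k, res) = (k, 0, res ++ diag n k) := by
        unfold innerA
        rw [foldA_up k.toNat 0 k 0 k res (by omega),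
          diag_even_le n k h0 (by omega) hp]
        simp only [Prod.mk.injEq, and_true]
        exact ⟨by omega, by omega⟩
      simp only [h1]
      rw [if_pos (show True ∧ k ≠ n from ⟨trivial, by omega⟩), if_neg (by norm_num),
        if_pos (show True ∧ k ≠ n from ⟨trivial, by omega⟩)]
      rw [ih n (k + 1) (k + 1) 0 (-1) _ (by omega) (by omega)
        (Or.inr ⟨rfl, by omega, rfl, rfl⟩)]
      rw [PySem.List.pyRange_one_cons (show k < n + 1 by omega), List.flatMap_cons,
        List.append_assoc]
    · rw [hd, hy, hx]
      have h1 : innerA (-1) k (k, 0, res) = (0, k, res ++ diag n k) := by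
        unfold innerA
        rw [foldA_down k.toNat 0 k k 0 res (by omega),
          diag_odd_le n k h0 (by omega) hp]
        simp only [Prod.mk.injEq, and_true]
        exact ⟨by omega, by omega⟩
      simp only [h1]
      rw [if_neg (by norm_num), if_pos (show True ∧ k ≠ n from ⟨trivial, by omega⟩),
        if_neg (by norm_num), if_pos (show True ∧ k ≠ n from ⟨trivial, by omega⟩)]
      rw [ih n (k + 1) 0 (k + 1) 1 _ (by omega) (by omega)
        (Or.inl ⟨rfl, by omega, rfl, rfl⟩)]
      rw [PySem.List.pyRange_one_cons (show k < n + 1 by omega), List.flatMap_cons,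
        List.append_assoc]

-- second phase: the j-loop with k = m remaining iterations emits diagonals 2n+1-m .. 2n
theorem loop2_inv (m : Nat) : ∀ (L : List Int), L.length = m →
    ∀ (n x y dir : Int) (res : List (List Int)) (kk : Int), kk = (m : Int) →
    (m : Int) ≤ n →
    (dir = 1 ∧ (2 * n + 1 - m) % 2 = 0 ∧ y = n ∧ x = n + 1 - m ∨
     dir = -1 ∧ (2 * n + 1 - m) % 2 = 1 ∧ y = n + 1 - m ∧ x = n) →
    (L.foldl step2 (x, y, kk, dir, res)).2.2.2.2 =
      res ++ (PySem.List.pyRange (2 * n + 1 - m) (2 * n + 1) 1).flatMap (diag n) := by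
  induction m with
  | zero =>
    intro L hL n x y dir res kk hkk hmn hinv
    rw [List.length_eq_zero_iff.mp hL]
    simp only [List.foldl_nil]
    rw [PySem.List.pyRange_one_eq_nil (by omega), List.flatMap_nil, List.append_nil]
  | succ m ih =>
    intro L hL n x y dir res kk hkk hmn hinv
    rcases L with _ | ⟨a, L'⟩
    · simp at hL
    have hL' : L'.length = m := by simpa using hL
    have hcast : ((m + 1 : Nat) : Int) = (m : Int) + 1 := by push_cast; ring
    rw [List.foldl_cons, hkk, hcast, show 2 * n + 1 - ((m : Int) + 1) = 2 * n - m by ring]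
    rcases hinv with ⟨hd, hp, hy, hx⟩ | ⟨hd, hp, hy, hx⟩
    · rw [hd, hy, hx, hcast, show n + 1 - ((m : Int) + 1) = n - m by ring]
      have h1 : innerC 1 ((m : Int) + 1) (n - (m : Int), n, res) =
          (n, n - (m : Int), res ++ diag n (2 * n - (m : Int))) := by
        unfold innerC
        rw [foldC_up m (n - (m : Int)) n res, show n - (m : Int) + (m : Int) = n by ring,
          diag_even_gt n (2 * n - (m : Int)) (by omega) (by omega) (by omega),
          show (2 * n + 1 - (2 * n - (m : Int))).toNat = m + 1 by omega]
        simp only [Prod.mk.injEq, true_and]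
        first
        | refine List.map_congr_left ?_
        | refine congrArg _ (List.map_congr_left ?_)
        intro j _
        simp only [List.cons.injEq, and_true, true_and]
        omega
      have hst : step2 (n - (m : Int), n, (m : Int) + 1, 1, res) a =
          (n, n - (m : Int) + 1, (m : Int) + 1 - 1, -1, res ++ diag n (2 * n - (m : Int))) := by
        unfold step2
        simp only [h1]
        norm_num
      rw [hst, show (m : Int) + 1 - 1 = (m : Int) by ring,
        ih L' hL' n n (n - (m : Int) + 1) (-1) _ (m : Int) rfl (by omega)
          (Or.inr ⟨rfl, by omega, by omega, rfl⟩)]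
      rw [PySem.List.pyRange_one_cons (show 2 * n - (m : Int) < 2 * n + 1 by omega),
        List.flatMap_cons, List.append_assoc]
      rw [show 2 * n - (m : Int) + 1 = 2 * n + 1 - (m : Int) by ring]
    · rw [hd, hy, hx, hcast, show n + 1 - ((m : Int) + 1) = n - m by ring]
      have h1 : innerC (-1) ((m : Int) + 1) (n, n - (m : Int), res) =
          (n - (m : Int), n, res ++ diag n (2 * n - (m : Int))) := by
        unfold innerC
        rw [foldC_down m n (n - (m : Int)) res, show n - (m : Int) + (m : Int) = n by ring,
          diag_odd_gt n (2 * n - (m : Int)) (by omega) (by omega) (by omega),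
          show (2 * n + 1 - (2 * n - (m : Int))).toNat = m + 1 by omega]
        simp only [Prod.mk.injEq, true_and]
        first
        | refine List.map_congr_left ?_
        | refine congrArg _ (List.map_congr_left ?_)
        intro j _
        simp only [List.cons.injEq, and_true]
        omega
      have hst : step2 (n, n - (m : Int), (m : Int) + 1, -1, res) a =
          (n - (m : Int) + 1, n, (m : Int) + 1 - 1, 1, res ++ diag n (2 * n - (m : Int))) := by
        unfold step2
        simp only [h1]
        norm_num
      rw [hst, show (m : Int) + 1 - 1 = (m : Int) by ring,
        ih L' hL' n (n - (m : Int) + 1) n 1 _ (m : Int) rfl (by omega)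
          (Or.inl ⟨rfl, by omega, rfl, by omega⟩)]
      rw [PySem.List.pyRange_one_cons (show 2 * n - (m : Int) < 2 * n + 1 by omega),
        List.flatMap_cons, List.append_assoc]
      rw [show 2 * n - (m : Int) + 1 = 2 * n + 1 - (m : Int) by ring]

-- A also equals the concatenation of the anti-diagonals
theorem a_eq_flatMap (n : Int) :
    Zigzag_scan n = (PySem.List.pyRange 0 (2 * n + 1) 1).flatMap (diag n) := by
  by_cases hn : n < 0
  · unfold Zigzag_scan
    rw [whileA_stop _ _ _ _ _ _ (by omega)]
    simp only []
    rw [PySem.List.pyRange_one_eq_nil (show (0:Int) - 1 ≤ 0 by omega),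
      PySem.List.pyRange_one_eq_nil (show 2 * n + 1 ≤ 0 by omega)]
    simp
  · unfold Zigzag_scan
    rw [whileA_inv n.toNat n 0 0 0 1 [] (by omega) le_rfl
      (Or.inl ⟨rfl, by omega, rfl, rfl⟩)]
    by_cases hpar : n % 2 = 0
    · rw [if_pos hpar, if_pos hpar, if_pos hpar]
      simp only [List.nil_append]
      norm_num
      have hlen : (PySem.List.pyRange 0 n 1).length = n.toNat := by
        rw [PySem.List.length_pyRange_one]; omega
      rw [loop2_inv n.toNat (PySem.List.pyRange 0 n 1) hlen n n 1 (-1) _ n (by omega) (by omega)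
        (Or.inr ⟨rfl, by omega, by omega, rfl⟩)]
      rw [show 2 * n + 1 - ((n.toNat : Int)) = n + 1 by omega, ← List.flatMap_append,
        ← PySem.List.pyRange_one_append 0 (n + 1) (2 * n + 1) (by omega) (by omega)]
    · rw [if_neg hpar, if_neg hpar, if_neg hpar]
      simp only [List.nil_append]
      norm_num
      have hlen : (PySem.List.pyRange 0 n 1).length = n.toNat := by
        rw [PySem.List.length_pyRange_one]; omega
      rw [loop2_inv n.toNat (PySem.List.pyRange 0 n 1) hlen n 1 n 1 _ n (by omega) (by omega)
        (Or.inl ⟨rfl, by omega, rfl, by omega⟩)]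
      rw [show 2 * n + 1 - ((n.toNat : Int)) = n + 1 by omega, ← List.flatMap_append,
        ← PySem.List.pyRange_one_append 0 (n + 1) (2 * n + 1) (by omega) (by omega)]

-- ===== VERDICT (by name: the statement is the Claim_ definition above) =====
theorem Zigzag_scan_spec : Claim_equal_Zigzag_scan := by
  intro n _
  unfold Spec_Zigzag_scan
  rw [a_eq_flatMap, alt_eq_flatMap]
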